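-- pv_equiv track=rewrite | github.com/myreprise/advent_of_code | 2024/day09 - disk fragmenter/p2_solution.py | find_free_span
-- ===== SOURCE A (Python) =====
-- def find_free_span(blocks, length):
--     free_start = -1
--     free_length = 0
--     for i, block in enumerate(blocks):
--         if block == '.':
--             if free_start == -1:
--                 free_start = i
--             free_length += 1
--             if free_length == length:
--                 return free_start
--         else:
--             free_start = -1
--             free_length = 0
--     return None
-- ===== SOURCE B (Python) =====
-- def find_free_span(blocks, length):
--     # Two-phase: collect the indices of all '.' blocks, then slide a window over
--     # that index list pairing each dot index with the one length-1 entries later;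
--     # a pair spanning exactly length-1 positions marks a contiguous free run, and
--     # the first such pair's left index is the run's start. A zero/negative request
--     # never matches.
--     if length <= 0:
--         return None
--     dots = [i for i, b in enumerate(blocks) if b == '.']
--     for a, b in zip(dots, dots[length - 1:]):
--         if b - a == length - 1:
--             return a
--     return None
-- ===== Notes on version B (the rewrite author's own statement) =====
-- stated objective: alternative
-- what changed: Replaces A's stateful single scan carrying (free_start, free_length) with a two-phase index method: first collect the list of indices of '.' blocks, then slide a fixed-distance window over that index list (zip of the list with itself shifted by length-1); a pair of dot indices exactly length-1 apart marks a contiguous free run and its left index is returned.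
import Mathlib
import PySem

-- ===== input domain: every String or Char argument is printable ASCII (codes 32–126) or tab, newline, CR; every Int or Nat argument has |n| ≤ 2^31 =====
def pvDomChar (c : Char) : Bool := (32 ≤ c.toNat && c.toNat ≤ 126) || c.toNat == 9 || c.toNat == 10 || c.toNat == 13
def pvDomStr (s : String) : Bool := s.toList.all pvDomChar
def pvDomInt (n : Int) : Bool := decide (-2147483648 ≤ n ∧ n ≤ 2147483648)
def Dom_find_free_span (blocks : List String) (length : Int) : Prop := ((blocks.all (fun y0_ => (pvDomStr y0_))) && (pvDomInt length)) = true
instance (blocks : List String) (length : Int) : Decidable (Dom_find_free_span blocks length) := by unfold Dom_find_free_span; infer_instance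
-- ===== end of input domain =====

-- B replaces A's stateful (free_start, free_length) scan by a two-phase method:
-- collect the indices of '.' blocks, then scan the zip of that index list with
-- itself shifted by length-1 for a pair exactly length-1 apart (objective: alternative).


-- ===== PORT A =====
-- loop over enumerate(blocks) with state (free_start, free_length); early return via Option
def goA (length : Int) : List String → Int → Int → Int → Option Int
  | [], _, _, _ => none
  | b :: rest, i, fs, fl =>
    if b = "." then
      let fs' := if fs = -1 then i else fs
      let fl' := fl + 1
      if fl' = length then some fs' else goA length rest (i + 1) fs' fl'
    else goA length rest (i + 1) (-1) 0

def find_free_span (blocks : List String) (length : Int) : Option Int :=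
  goA length blocks 0 (-1) 0

-- ===== PORT B =====
-- the comprehension [i for i, b in enumerate(blocks) if b == '.'], carrying the enumerate index
def dotIdx (i : Int) : List String → List Int
  | [] => []
  | b :: rest => if b = "." then i :: dotIdx (i + 1) rest else dotIdx (i + 1) rest

-- the 'for a, b in zip(...)' loop with its early return
def winScan (length : Int) : List (Int × Int) → Option Int
  | [] => none
  | (a, b) :: rest => if b - a = length - 1 then some a else winScan length rest

def find_free_span_alt (blocks : List String) (length : Int) : Option Int :=
  if length ≤ 0 then none
  else
    let dots := dotIdx 0 blocks
    winScan length (dots.zip (PySem.List.slice dots (some (length - 1)) none))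

-- ===== PRECONDITION & SPEC =====
def Spec_find_free_span (blocks : List String) (length : Int) (out : Option Int) : Prop := out = find_free_span_alt blocks length
instance (blocks : List String) (length : Int) (out : Option Int) : Decidable (Spec_find_free_span blocks length out) := by unfold Spec_find_free_span; infer_instance

-- ===== CLAIM (what is proved, stated in full; the proofs are below) =====
def Claim_equal_find_free_span : Prop := ∀ (blocks : List String) (length : Int), Dom_find_free_span blocks length → Spec_find_free_span blocks length (find_free_span blocks length)

-- ===== LEMMAS AND PROOFS =====

-- non-positive length: A never returns (free_length' is at least 1)
theorem goA_nonpos (length : Int) (hL : length ≤ 0) :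
    ∀ (blocks : List String) (i fs fl : Int), 0 ≤ fl → goA length blocks i fs fl = none := by
  intro blocks
  induction blocks with
  | nil => intro i fs fl _; simp [goA]
  | cons b rest ih =>
    intro i fs fl hfl
    simp only [goA]
    split
    · rw [if_neg (by omega)]
      exact ih _ _ _ (by omega)
    · exact ih _ _ _ (by omega)

theorem getElem_eq_of_getElem? {α : Type} {l : List α} {j : Nat} {x : α}
    (h : j < l.length) (h? : l[j]? = some x) : l[j] = x := by
  rw [List.getElem?_eq_getElem h] at h?
  exact Option.some.inj h?

-- the consecutive run a, a+1, …, a+n-1 (proof-only abstraction of A's current run of dots)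
def runP (a : Int) (n : Nat) : List Int := (List.range n).map (fun (j : Nat) => a + (j : Int))

theorem length_runP (a : Int) (n : Nat) : (runP a n).length = n := by simp [runP]

theorem runP_getElem? (a : Int) (n j : Nat) (h : j < n) :
    (runP a n)[j]? = some (a + (j : Int)) := by
  rw [runP, List.getElem?_map]
  have hr : (List.range n)[j]? = some j := by simp [h]
  rw [hr]
  rfl

theorem runP_cons (a : Int) (n : Nat) : runP a (n + 1) = a :: runP (a + 1) n := by
  apply List.ext_getElem?
  intro j
  match j with
  | 0 => rw [runP_getElem? a (n + 1) 0 (by omega)]; simp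
  | Nat.succ k =>
    simp only [List.getElem?_cons_succ]
    by_cases hk : k < n
    · rw [runP_getElem? a (n + 1) (k + 1) (by omega), runP_getElem? (a + 1) n k hk]
      congr 1
      push_cast
      ring
    · rw [List.getElem?_eq_none (by simp only [length_runP]; omega),
          List.getElem?_eq_none (by simp only [length_runP]; omega)]

theorem runP_snoc (a : Int) (n : Nat) : runP a (n + 1) = runP a n ++ [a + n] := by
  simp [runP, List.range_succ]

-- dot indices grow at least as fast as their position
theorem dotIdx_ge : ∀ (bs : List String) (base : Int) (j : Nat) (h : j < (dotIdx base bs).length),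
    base + (j : Int) ≤ (dotIdx base bs)[j] := by
  intro bs
  induction bs with
  | nil => intro base j h; simp [dotIdx] at h
  | cons b rest ih =>
    intro base j h
    by_cases hb : b = "."
    · simp only [dotIdx, if_pos hb] at h ⊢
      match j with
      | 0 => simp
      | Nat.succ k =>
        simp only [List.getElem_cons_succ]
        have := ih (base + 1) k (by simpa using h)
        push_cast
        omega
    · simp only [dotIdx, if_neg hb] at h ⊢
      have := ih (base + 1) j h
      omega

theorem zip_drop_nil (l : List Int) (m : Nat) (h : l.length ≤ m) :
    l.zip (l.drop m) = [] := by
  rw [List.drop_eq_nil_of_le h, List.zip_nil_right]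

theorem zip_drop_step (x : Int) (T : List Int) (m : Nat) (hm : 1 ≤ m) (h : m - 1 < T.length) :
    (x :: T).zip ((x :: T).drop m) = (x, T[m - 1]) :: T.zip (T.drop m) := by
  obtain ⟨k, rfl⟩ : ∃ k, m = k + 1 := ⟨m - 1, by omega⟩
  have hk : k < T.length := by simpa using h
  rw [List.drop_succ_cons, List.drop_eq_getElem_cons hk, List.zip_cons_cons]
  simp

theorem zip_drop_head (l : List Int) (m : Nat) (h : m < l.length) :
    ∃ t, l.zip (l.drop m) =
      (l[0]'(Nat.lt_of_le_of_lt (Nat.zero_le m) h), l[m]) :: t := by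
  match l with
  | [] => simp at h
  | x :: T =>
    match m with
    | 0 => exact ⟨T.zip T, by simp⟩
    | Nat.succ k =>
      have hk : k < T.length := by simpa using h
      refine ⟨T.zip (T.drop (k + 1)), ?_⟩
      rw [zip_drop_step x T (k + 1) (by omega) (by simpa using hk)]
      simp

-- skipping a consecutive run shorter than the window: no pair starting in the run can match
theorem winScan_skip (L : Int) (hL : 1 ≤ L) (i : Int) :
    ∀ (s : Nat), (s : Int) ≤ L - 1 →
    ∀ (D' : List Int), (∀ (j : Nat) (h : j < D'.length), i + 1 + (j : Int) ≤ D'[j]) →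
      winScan L ((runP (i - s) s ++ D').zip ((runP (i - s) s ++ D').drop (L - 1).toNat)) =
      winScan L (D'.zip (D'.drop (L - 1).toNat)) := by
  intro s
  induction s with
  | zero => intro _ D' _; simp [runP]
  | succ n ih =>
    intro hs D' hD'
    have hm : ((L - 1).toNat : Int) = L - 1 := by omega
    have hnm : n + 1 ≤ (L - 1).toNat := by omega
    have hcons : runP (i - ((n + 1 : Nat) : Int)) (n + 1) ++ D' =
        (i - ((n + 1 : Nat) : Int)) :: (runP (i - (n : Nat)) n ++ D') := by
      have he : (i - ((n + 1 : Nat) : Int)) + 1 = i - (n : Nat) := by push_cast; ring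
      rw [runP_cons, he, List.cons_append]
    rw [hcons]
    by_cases hlen : (L - 1).toNat - 1 < (runP (i - (n : Nat)) n ++ D').length
    · rw [zip_drop_step _ _ _ (by omega) hlen]
      have hl : (L - 1).toNat - 1 - n < D'.length := by
        simp only [List.length_append, length_runP] at hlen
        omega
      have hTval : (runP (i - (n : Nat)) n ++ D')[(L - 1).toNat - 1]'hlen =
          D'[(L - 1).toNat - 1 - n]'hl := by
        apply getElem_eq_of_getElem? hlen
        rw [List.getElem?_append_right (by simp only [length_runP]; omega)]
        simp only [length_runP]
        exact List.getElem?_eq_getElem hl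
      have hbound := hD' _ hl
      have hbig : ¬ ((runP (i - (n : Nat)) n ++ D')[(L - 1).toNat - 1]'hlen -
          (i - ((n + 1 : Nat) : Int)) = L - 1) := by
        rw [hTval]
        intro hc
        have hcast : (((L - 1).toNat - 1 - n : Nat) : Int) = L - 2 - (n : Int) := by omega
        rw [hcast] at hbound
        push_cast at hc
        omega
      simp only [winScan, if_neg hbig]
      exact ih (by omega) D' hD'
    · rw [zip_drop_nil _ _ (by simp only [List.length_cons]; omega)]
      rw [zip_drop_nil D' _ (by simp only [List.length_append, length_runP] at hlen; omega)]

-- main invariant: A's scan with a pending run of s dots ending at i-1 equals B's window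
-- scan over that run's indices followed by the dot indices of the remaining blocks
theorem goA_eq_win (L : Int) (hL : 1 ≤ L) :
    ∀ (blocks : List String) (i : Int) (s : Nat), 0 ≤ i - s → (s : Int) ≤ L - 1 →
      goA L blocks i (if s = 0 then -1 else i - (s : Int)) (s : Int) =
      winScan L ((runP (i - s) s ++ dotIdx i blocks).zip
                 ((runP (i - s) s ++ dotIdx i blocks).drop (L - 1).toNat)) := by
  intro blocks
  induction blocks with
  | nil =>
    intro i s his hs
    simp only [dotIdx, List.append_nil]
    rw [zip_drop_nil _ _ (by simp only [length_runP]; omega)]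
    simp [goA, winScan]
  | cons b rest ih =>
    intro i s his hs
    by_cases hb : b = "."
    · have hfs' : (if (if s = 0 then (-1 : Int) else i - (s : Int)) = -1 then i
          else (if s = 0 then (-1 : Int) else i - (s : Int))) = i - (s : Int) := by
        by_cases h0 : s = 0
        · simp [h0]
        · have : ¬ (i - (s : Int) = -1) := by omega
          simp [h0, this]
      have hD : runP (i - s) s ++ dotIdx i (b :: rest) =
          runP (i - s) (s + 1) ++ dotIdx (i + 1) rest := by
        have he : i - (s : Int) + (s : Int) = i := by ring
        rw [runP_snoc, he]
        simp [dotIdx, hb]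
      simp only [goA, if_pos hb, hfs']
      by_cases hret : (s : Int) + 1 = L
      · rw [if_pos hret, hD]
        set D := runP (i - s) (s + 1) ++ dotIdx (i + 1) rest with hDdef
        have hms : (L - 1).toNat = s := by omega
        have hsl : s < D.length := by
          simp only [hDdef, List.length_append, length_runP]; omega
        rw [hms]
        obtain ⟨t, ht⟩ := zip_drop_head D s hsl
        rw [ht]
        have h0? : D[0]? = some (i - (s : Int)) := by
          rw [hDdef, List.getElem?_append_left (by simp only [length_runP]; omega),
              runP_getElem? _ _ 0 (by omega)]
          norm_num
        have hs? : D[s]? = some i := by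
          rw [hDdef, List.getElem?_append_left (by simp only [length_runP]; omega),
              runP_getElem? _ _ s (by omega)]
          have he : i - (s : Int) + (s : Int) = i := by ring
          rw [he]
        have h0 := getElem_eq_of_getElem? (Nat.lt_of_le_of_lt (Nat.zero_le s) hsl) h0?
        have hsv := getElem_eq_of_getElem? hsl hs?
        simp only [winScan, h0, hsv, if_pos (by omega : i - (i - (s : Int)) = L - 1)]
      · rw [if_neg hret, hD]
        have hnext := ih (i + 1) (s + 1) (by push_cast; omega) (by push_cast; omega)
        simp only [if_neg (Nat.succ_ne_zero s)] at hnext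
        push_cast at hnext
        have he : i + 1 - ((s : Int) + 1) = i - (s : Int) := by ring
        rw [he] at hnext
        exact hnext
    · simp only [goA, if_neg hb]
      have hstep : dotIdx i (b :: rest) = dotIdx (i + 1) rest := by simp [dotIdx, hb]
      rw [hstep, winScan_skip L hL i s hs (dotIdx (i + 1) rest) (dotIdx_ge rest (i + 1))]
      have hnext := ih (i + 1) 0 (by omega) (by push_cast; omega)
      simp only [Nat.cast_zero, sub_zero, runP, List.range_zero] at hnext
      simpa [runP] using hnext

-- ===== VERDICT (by name: the statement is the Claim_ definition above) =====
theorem find_free_span_spec : Claim_equal_find_free_span := by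
  intro blocks L _
  unfold Spec_find_free_span find_free_span find_free_span_alt
  by_cases hL : L ≤ 0
  · rw [if_pos hL]
    exact goA_nonpos L hL blocks 0 (-1) 0 le_rfl
  · rw [if_neg hL]
    show goA L blocks 0 (-1) 0 =
      winScan L ((dotIdx 0 blocks).zip (PySem.List.slice (dotIdx 0 blocks) (some (L - 1)) none))
    rw [PySem.List.slice_from (dotIdx 0 blocks) (by omega : (0 : Int) ≤ L - 1)]
    have h := goA_eq_win L (by omega) blocks 0 0 (by norm_num) (by omega)
    simpa [runP] using h
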